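-- pv_equiv track=rewrite | github.com/m0hammadb/CodeWarsChallenges | AlphabetWars.py | get_nobomb_string
-- ===== SOURCE A (Python) =====
-- def get_nobomb_string(inp):
--     rValue = ""
--     for i in range(len(inp)):
--         leftbomb = False
--         rightbomb = False
--         if(i>0):
--             if(inp[i-1] == "*"):
--                 leftbomb = True
--
--         if(i < len(inp) - 1):
--             if(inp[i + 1] == "*"):
--                 rightbomb = True
--
--         if(leftbomb or rightbomb or inp[i] == "*"):
--             rValue += "_"
--         else:
--             rValue += inp[i]
--
--     return rValue
-- ===== SOURCE B (Python) =====
-- def get_nobomb_string(inp):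
--     doomed = set()
--     for j, c in enumerate(inp):
--         if c == "*":
--             doomed.update((j - 1, j, j + 1))
--     return "".join("_" if i in doomed else c for i, c in enumerate(inp))
-- ===== Notes on version B (the rewrite author's own statement) =====
-- stated objective: simpler
-- what changed: Replaces A's per-index left/self/right neighbour checks with a mark-then-emit decomposition: one pass records j-1, j, j+1 for every bomb position j in a set, a join-based second pass emits an underscore exactly at the recorded positions.
import Mathlib
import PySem

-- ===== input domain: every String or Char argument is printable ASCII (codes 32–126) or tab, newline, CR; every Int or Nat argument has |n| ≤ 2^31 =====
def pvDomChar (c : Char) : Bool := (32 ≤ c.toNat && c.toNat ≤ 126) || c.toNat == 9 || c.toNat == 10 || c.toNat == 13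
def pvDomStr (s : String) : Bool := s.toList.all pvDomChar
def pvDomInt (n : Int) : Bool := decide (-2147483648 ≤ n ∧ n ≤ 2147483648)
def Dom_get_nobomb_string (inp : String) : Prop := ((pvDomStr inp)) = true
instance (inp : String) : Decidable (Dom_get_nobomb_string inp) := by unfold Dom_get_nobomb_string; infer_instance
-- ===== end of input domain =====

-- B replaces A's per-index left/self/right neighbour checks with a simpler mark-then-emit
-- decomposition: mark j-1, j, j+1 for every bomb j in a set, then emit '_' at marked positions.

-- ===== PORT A =====
-- one pass over the indices; at each index i check the left neighbour, the right neighbour and the cell itself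
def get_nobomb_string (inp : String) : String :=
  String.ofList ((PySem.List.pyRange 0 (inp.toList.length : Int) 1).foldl (fun rValue i =>
    if (decide (0 < i) && decide (PySem.List.pyGetD inp.toList (i - 1) ' ' = '*'))
       || (decide (i < (inp.toList.length : Int) - 1) && decide (PySem.List.pyGetD inp.toList (i + 1) ' ' = '*'))
       || decide (PySem.List.pyGetD inp.toList i ' ' = '*')
    then rValue ++ ['_'] else rValue ++ [PySem.List.pyGetD inp.toList i ' ']) [])

-- ===== PORT B =====
-- mark pass: record j-1, j, j+1 in the set for every bomb position j
def pvMark (d : PySem.Set Int) (jc : Int × Char) : PySem.Set Int :=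
  if jc.2 = '*' then PySem.Set.update d [jc.1 - 1, jc.1, jc.1 + 1] else d

def get_nobomb_string_alt (inp : String) : String :=
  let doomed := (PySem.List.enumerate inp.toList 0).foldl pvMark PySem.Set.empty
  String.ofList ((PySem.List.enumerate inp.toList 0).map (fun ic =>
    if PySem.Set.contains doomed ic.1 then '_' else ic.2))

-- ===== PRECONDITION & SPEC =====
def Spec_get_nobomb_string (inp : String) (out : String) : Prop := out = get_nobomb_string_alt inp
instance (inp : String) (out : String) : Decidable (Spec_get_nobomb_string inp out) := by unfold Spec_get_nobomb_string; infer_instance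

-- ===== CLAIM (what is proved, stated in full; the proofs are below) =====
def Claim_equal_get_nobomb_string : Prop := ∀ (inp : String), Dom_get_nobomb_string inp → Spec_get_nobomb_string inp (get_nobomb_string inp)

-- ===== LEMMAS AND PROOFS =====

-- characterisation of the marked set built by B's first pass
theorem pv_mem_mark (l : List Char) (s : Int) (init : PySem.Set Int) (x : Int) :
    (x ∈ (PySem.List.enumerate l s).foldl pvMark init) ↔
      x ∈ init ∨ ∃ j : Nat, l[j]? = some '*' ∧ (x = s + j - 1 ∨ x = s + j ∨ x = s + j + 1) := by
  induction l generalizing s init with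
  | nil => simp [PySem.List.enumerate]
  | cons c t ih =>
    rw [PySem.List.enumerate_cons, List.foldl_cons, ih]
    by_cases hc : c = '*'
    · have hm : pvMark init (s, c) = PySem.Set.update init [s - 1, s, s + 1] := by
        simp [pvMark, hc]
      rw [hm]
      constructor
      · rintro (h | ⟨j, hj, hx⟩)
        · rw [PySem.Set.mem_update] at h
          rcases h with h | h
          · exact Or.inl h
          · refine Or.inr ⟨0, by simp [hc], ?_⟩
            simp only [List.mem_cons, List.not_mem_nil, or_false] at h
            push_cast; omega
        · exact Or.inr ⟨j + 1, by simpa using hj, by push_cast at hx ⊢; omega⟩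
      · rintro (h | ⟨j, hj, hx⟩)
        · exact Or.inl ((PySem.Set.mem_update _ _ _).mpr (Or.inl h))
        · cases j with
          | zero =>
            refine Or.inl ((PySem.Set.mem_update _ _ _).mpr (Or.inr ?_))
            simp only [List.mem_cons]
            push_cast at hx; omega
          | succ j =>
            exact Or.inr ⟨j, by simpa using hj, by push_cast at hx ⊢; omega⟩
    · have hm : pvMark init (s, c) = init := by simp [pvMark, hc]
      rw [hm]
      constructor
      · rintro (h | ⟨j, hj, hx⟩)
        · exact Or.inl h
        · exact Or.inr ⟨j + 1, by simpa using hj, by push_cast at hx ⊢; omega⟩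
      · rintro (h | ⟨j, hj, hx⟩)
        · exact Or.inl h
        · cases j with
          | zero => simp only [List.getElem?_cons_zero, Option.some.injEq] at hj; exact absurd hj hc
          | succ j =>
            exact Or.inr ⟨j, by simpa using hj, by push_cast at hx ⊢; omega⟩

-- A's per-index condition, as a proposition
theorem pv_cond_iff (l : List Char) (k : Nat) (hk : k < l.length) :
    (((0:Int) < (k:Int) ∧ PySem.List.pyGetD l ((k:Int) - 1) ' ' = '*') ∨
     ((k:Int) < (l.length : Int) - 1 ∧ PySem.List.pyGetD l ((k:Int) + 1) ' ' = '*') ∨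
     PySem.List.pyGetD l (k:Int) ' ' = '*') ↔
    (∃ j : Nat, l[j]? = some '*' ∧ ((k:Int) = (j:Int) - 1 ∨ (k:Int) = (j:Int) ∨ (k:Int) = (j:Int) + 1)) := by
  constructor
  · rintro (⟨h0, h⟩ | ⟨h1, h⟩ | h)
    · have hb0 : (0:Int) ≤ (k:Int) - 1 := by omega
      have hb1 : (k:Int) - 1 < (l.length : Int) := by omega
      rw [PySem.List.pyGetD_eq_getElem l ' ' hb0 hb1] at h
      exact ⟨((k:Int) - 1).toNat, by simpa using (List.getElem?_eq_getElem (by omega : ((k:Int)-1).toNat < l.length)).trans (by rw [h]), by omega⟩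
    · have hb0 : (0:Int) ≤ (k:Int) + 1 := by omega
      have hb1 : (k:Int) + 1 < (l.length : Int) := by omega
      rw [PySem.List.pyGetD_eq_getElem l ' ' hb0 hb1] at h
      exact ⟨((k:Int) + 1).toNat, by simpa using (List.getElem?_eq_getElem (by omega : ((k:Int)+1).toNat < l.length)).trans (by rw [h]), by omega⟩
    · have hb0 : (0:Int) ≤ (k:Int) := by omega
      have hb1 : (k:Int) < (l.length : Int) := by omega
      rw [PySem.List.pyGetD_eq_getElem l ' ' hb0 hb1] at h
      exact ⟨k, by simpa using (List.getElem?_eq_getElem (by simpa using hk)).trans (by simpa using congrArg some h), by omega⟩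
  · rintro ⟨j, hj, hx⟩
    rw [List.getElem?_eq_some_iff] at hj
    obtain ⟨hjlt, hjv⟩ := hj
    rcases hx with hx | hx | hx
    · refine Or.inr (Or.inl ⟨by omega, ?_⟩)
      have hb0 : (0:Int) ≤ (k:Int) + 1 := by omega
      have hb1 : (k:Int) + 1 < (l.length : Int) := by omega
      rw [PySem.List.pyGetD_eq_getElem l ' ' hb0 hb1]
      have : ((k:Int) + 1).toNat = j := by omega
      simp only [this]; exact hjv
    · refine Or.inr (Or.inr ?_)
      have hb0 : (0:Int) ≤ (k:Int) := by omega
      have hb1 : (k:Int) < (l.length : Int) := by omega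
      rw [PySem.List.pyGetD_eq_getElem l ' ' hb0 hb1]
      have : ((k:Int)).toNat = j := by omega
      simp only [this]; exact hjv
    · refine Or.inl ⟨by omega, ?_⟩
      have hb0 : (0:Int) ≤ (k:Int) - 1 := by omega
      have hb1 : (k:Int) - 1 < (l.length : Int) := by omega
      rw [PySem.List.pyGetD_eq_getElem l ' ' hb0 hb1]
      have : ((k:Int) - 1).toNat = j := by omega
      simp only [this]; exact hjv

-- ===== VERDICT (by name: the statement is the Claim_ definition above) =====
theorem get_nobomb_string_spec : Claim_equal_get_nobomb_string := by
  intro inp _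
  unfold Spec_get_nobomb_string get_nobomb_string get_nobomb_string_alt
  have hbody : (fun (rValue : List Char) (i : Int) =>
      if (decide (0 < i) && decide (PySem.List.pyGetD inp.toList (i - 1) ' ' = '*'))
         || (decide (i < (inp.toList.length : Int) - 1) && decide (PySem.List.pyGetD inp.toList (i + 1) ' ' = '*'))
         || decide (PySem.List.pyGetD inp.toList i ' ' = '*')
      then rValue ++ ['_'] else rValue ++ [PySem.List.pyGetD inp.toList i ' ']) =
      (fun (rValue : List Char) (i : Int) => rValue ++
        [if (decide (0 < i) && decide (PySem.List.pyGetD inp.toList (i - 1) ' ' = '*'))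
            || (decide (i < (inp.toList.length : Int) - 1) && decide (PySem.List.pyGetD inp.toList (i + 1) ' ' = '*'))
            || decide (PySem.List.pyGetD inp.toList i ' ' = '*')
         then '_' else PySem.List.pyGetD inp.toList i ' ']) := by
    funext rValue i; split <;> rfl
  rw [hbody, PySem.List.foldl_append_singleton_eq_map, List.nil_append]
  refine congrArg String.ofList (List.ext_getElem ?_ ?_)
  · simp [PySem.List.length_pyRange_one, PySem.List.length_enumerate]
  · intro k hk1 hk2
    have hkl : k < inp.toList.length := by
      simp only [List.length_map, PySem.List.length_pyRange_one] at hk1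
      omega
    rw [List.getElem_map, List.getElem_map,
        PySem.List.getElem_pyRange_one _ _ _ (by simpa [PySem.List.length_pyRange_one] using hk1),
        PySem.List.getElem_enumerate _ _ _ (by simpa [PySem.List.length_enumerate] using hkl)]
    simp only [zero_add]
    have hb : ((decide ((0:Int) < (k:Int)) && decide (PySem.List.pyGetD inp.toList ((k:Int) - 1) ' ' = '*'))
         || (decide ((k:Int) < (inp.toList.length : Int) - 1) && decide (PySem.List.pyGetD inp.toList ((k:Int) + 1) ' ' = '*'))
         || decide (PySem.List.pyGetD inp.toList (k:Int) ' ' = '*')) =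
        PySem.Set.contains ((PySem.List.enumerate inp.toList 0).foldl pvMark PySem.Set.empty) (k:Int) := by
      rw [Bool.eq_iff_iff]
      simp only [Bool.or_eq_true, Bool.and_eq_true, decide_eq_true_iff, PySem.Set.contains_iff]
      rw [pv_mem_mark]
      simp only [PySem.Set.empty, List.not_mem_nil, false_or, zero_add]
      rw [or_assoc]
      exact pv_cond_iff inp.toList k hkl
    rw [hb, PySem.List.pyGetD_eq_getElem inp.toList ' ' (by omega) (by exact_mod_cast hkl)]
    simp
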